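-- pv_equiv track=rewrite | github.com/wj210/Causal-Faithfulness | utils/causal_trace.py | find_subject_range
-- ===== SOURCE A (Python) =====
-- def find_subject_range(token_array):
--     """
--     Given a text, use a common key to filter out unwanted text
--     key = Question:
--     [text][text][key-2][text]...[key-1]**... -> get position of ** after last occurence of the key
--     token_array = list of tokens for the string
--     """
--     key_to_cut = 'Question:'
--     joined_token_array = "".join(token_array)
--     joined_token_key = "".join([s.strip() for s in key_to_cut.split()])
--     no_keys = len(joined_token_array.split(joined_token_key)) -1
--     total_tokens_traversed = 0
--     for _ in range(no_keys):
--         key_loc = joined_token_array.index(joined_token_key)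
--         loc = 0
--         tok_end = 0
--         for i,t in enumerate(token_array): # from the end
--             loc += len(t)
--             if loc >= key_loc + len(joined_token_key): # first one includes the end of the key
--                 tok_end = i + 1
--                 break
--         total_tokens_traversed += tok_end
--         token_array = token_array[tok_end:] # truncate away the 1st key
--         joined_token_array = "".join(token_array)
--     return total_tokens_traversed # return back total tokens traversed from the back. ,ie end of key1
-- ===== SOURCE B (Python) =====
-- def find_subject_range(token_array):
--     key = 'Question:'
--     joined = ''.join(token_array)
--     last = joined.rfind(key)
--     if last == -1:
--         return 0
--     end = last + len(key)
--     cum = 0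
--     n = 0
--     for t in token_array:
--         cum += len(t)
--         n += 1
--         if cum >= end:
--             break
--     return n
-- ===== Notes on version B (the rewrite author's own statement) =====
-- stated objective: alternative
-- what changed: A counts keys with split, then per key re-joins the token list, re-scans it with str.index and truncates it; B joins once, finds the last 'Question:' with a single rfind and makes one cumulative-length pass over the tokens.
import Mathlib
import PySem

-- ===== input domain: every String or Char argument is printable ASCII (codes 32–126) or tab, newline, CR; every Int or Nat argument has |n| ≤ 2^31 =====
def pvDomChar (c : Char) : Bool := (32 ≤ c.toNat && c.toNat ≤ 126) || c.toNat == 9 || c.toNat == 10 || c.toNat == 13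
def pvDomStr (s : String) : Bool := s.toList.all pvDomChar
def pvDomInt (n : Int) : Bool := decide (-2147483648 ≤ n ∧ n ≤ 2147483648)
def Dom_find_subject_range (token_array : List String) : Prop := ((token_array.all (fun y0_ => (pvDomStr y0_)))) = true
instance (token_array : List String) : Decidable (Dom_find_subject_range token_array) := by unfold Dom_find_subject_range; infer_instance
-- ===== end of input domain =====

-- B replaces A's per-key rejoin-and-rescan loop by one rfind of the last key plus a single
-- cumulative-length scan of the tokens (objective: alternative).

-- ===== PORT A =====
-- inner `for i,t in enumerate(token_array): loc += len(t); if loc >= target: tok_end = i+1; break`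
-- (`tok_end` keeps its initial 0 when the loop falls through)
def findA_inner (ts : List String) (target : Int) (i loc : Int) : Int :=
  match ts with
  | [] => 0
  | t :: r =>
    let loc' := loc + PySem.Str.len t
    if target ≤ loc' then i + 1 else findA_inner r target (i + 1) loc'

-- `joined.index(jk)` raises ValueError exactly when PySem.Str.find returns -1; those inputs are outside Pre_.
-- `joined.split(jk)` : jk is provably the nonempty string "Question:", so Chars.splitOn (the sep ≠ "" form) is exact.
def find_subject_range (token_array : List String) : Int :=
  let key_to_cut : String := "Question:"
  let joined_token_array := PySem.Str.join "" token_array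
  let joined_token_key := PySem.Str.join "" ((PySem.Str.split₀ key_to_cut).map PySem.Str.strip)
  let no_keys : Int := ((PySem.Chars.splitOn joined_token_array.toList joined_token_key.toList).length : Int) - 1
  let st := (PySem.List.pyRange 0 no_keys 1).foldl
    (fun (st : List String × String × Int) _ =>
      let ta := st.1
      let joined := st.2.1
      let total := st.2.2
      let key_loc := PySem.Str.find joined joined_token_key
      let tok_end := findA_inner ta (key_loc + PySem.Str.len joined_token_key) 0 0
      let ta' := PySem.List.slice ta (some tok_end) none
      (ta', PySem.Str.join "" ta', total + tok_end))
    (token_array, joined_token_array, 0)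
  st.2.2

-- ===== PORT B =====
-- `for t in token_array: cum += len(t); n += 1; if cum >= end: break` then `return n`
def altScan (e : Int) (ts : List String) (n cum : Int) : Int :=
  match ts with
  | [] => n
  | t :: r =>
    let cum' := cum + PySem.Str.len t
    let n' := n + 1
    if e ≤ cum' then n' else altScan e r n' cum'

def find_subject_range_alt (token_array : List String) : Int :=
  let key : String := "Question:"
  let joined := PySem.Str.join "" token_array
  let last := PySem.Str.rfind joined key
  if last = -1 then 0
  else altScan (last + PySem.Str.len key) token_array 0 0

-- ===== PRECONDITION & SPEC =====
-- helpers for Pre_: token char-length, first token boundary (in chars) at or past a char position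
def pvLen (t : String) : Nat := t.toList.length

def pvCut : List String → Nat → Nat
  | [], _ => 0
  | t :: r, e => if e ≤ pvLen t then pvLen t else pvLen t + pvCut r (e - pvLen t)

def pvOccL (s : List Char) (p : Nat) : Prop := "Question:".toList.isPrefixOf (s.drop p) = true

-- Pre_ excludes exactly the inputs on which A raises ValueError (`joined.index`): those where the token
-- covering the end of some occurrence of 'Question:' runs past the start of the next occurrence, so that
-- A's token-boundary truncation destroys that next occurrence and a later `.index` call finds nothing.
def Pre_find_subject_range (token_array : List String) : Prop :=
  ∀ p ∈ List.range (PySem.Str.join "" token_array).toList.length,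
    ∀ q ∈ List.range (PySem.Str.join "" token_array).toList.length,
      p < q → pvOccL (PySem.Str.join "" token_array).toList p →
      pvOccL (PySem.Str.join "" token_array).toList q →
      (∀ r ∈ List.range (PySem.Str.join "" token_array).toList.length,
        p < r → r < q → ¬ pvOccL (PySem.Str.join "" token_array).toList r) →
      pvCut token_array (p + 9) ≤ q

instance (token_array : List String) : Decidable (Pre_find_subject_range token_array) := by
  unfold Pre_find_subject_range pvOccL; infer_instance

def pvWitness_find_subject_range : List String := ["Quest", "ion: nice", " Question:", " 42"]

def Spec_find_subject_range (token_array : List String) (out : Int) : Prop := out = find_subject_range_alt token_array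
instance (token_array : List String) (out : Int) : Decidable (Spec_find_subject_range token_array out) := by unfold Spec_find_subject_range; infer_instance

-- ===== CLAIM (what is proved, stated in full; the proofs are below) =====
def Claim_equal_find_subject_range : Prop := ∀ (token_array : List String), Dom_find_subject_range token_array → Pre_find_subject_range token_array → Spec_find_subject_range token_array (find_subject_range token_array)

-- ===== LEMMAS AND PROOFS =====

-- the key as a char list
def pvK : List Char := "Question:".toList

-- greedy occurrence list of pvK in s (all occurrences: pvK has no self-overlap)
theorem pvFind_le (s : List Char) (h : ¬ PySem.Chars.find s pvK < 0) :
    (PySem.Chars.find s pvK).toNat + 9 ≤ s.length := by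
  have h0 : 0 ≤ PySem.Chars.find s pvK := by omega
  have hpre := (PySem.Chars.find_spec (s := s) (sub := pvK) h0).1.length_le
  rw [List.length_drop, show pvK.length = 9 from rfl] at hpre
  omega

def pvGOcc (s : List Char) : List Nat :=
  if h : PySem.Chars.find s pvK < 0 then []
  else ((PySem.Chars.find s pvK).toNat) ::
    (pvGOcc (s.drop ((PySem.Chars.find s pvK).toNat + 9))).map (· + ((PySem.Chars.find s pvK).toNat + 9))
termination_by s.length
decreasing_by
  have := pvFind_le s (by assumption)
  simp
  omega


-- ---- basic facts about the key and occurrences ----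

theorem pvOccL_iff (s : List Char) (p : Nat) : pvOccL s p ↔ pvK <+: s.drop p := by
  unfold pvOccL
  rw [show "Question:".toList = pvK from rfl]
  exact List.isPrefixOf_iff_prefix

theorem pvOccL_len {s : List Char} {p : Nat} (h : pvOccL s p) : p + 9 ≤ s.length := by
  rw [pvOccL_iff] at h
  have := h.length_le
  rw [List.length_drop, show pvK.length = 9 from rfl] at this
  omega

-- pvK has no self-overlap: two distinct occurrences are ≥ 9 chars apart
theorem pv_no_overlap {s : List Char} {p q : Nat} (hp : pvOccL s p) (hq : pvOccL s q)
    (hlt : p < q) : p + 9 ≤ q := by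
  by_contra hcon
  have hd : q - p ≥ 1 ∧ q - p ≤ 8 := by omega
  rw [pvOccL_iff] at hp hq
  obtain ⟨u, hu⟩ := hp
  have hdq : s.drop q = pvK.drop (q - p) ++ u := by
    have : s.drop q = (s.drop p).drop (q - p) := by
      rw [List.drop_drop]
      congr 1
      omega
    rw [this, ← hu, List.drop_append_of_le_length (by rw [show pvK.length = 9 from rfl]; omega)]
  rw [hdq] at hq
  obtain ⟨v, hv⟩ := hq
  have htk : pvK.take (9 - (q - p)) = pvK.drop (q - p) := by
    have h1 : (pvK.drop (q - p) ++ u).take (9 - (q - p)) = pvK.drop (q - p) := by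
      rw [List.take_append_of_le_length (by simp [show pvK.length = 9 from rfl])]
      exact List.take_of_length_le (by simp [show pvK.length = 9 from rfl])
    rw [← hv, List.take_append_of_le_length (by rw [show pvK.length = 9 from rfl]; omega)] at h1
    exact h1
  have : ∀ d, 1 ≤ d → d ≤ 8 → pvK.take (9 - d) ≠ pvK.drop d := by decide
  exact this (q - p) hd.1 hd.2 htk

-- membership in pvGOcc = being an occurrence
theorem pvGOcc_mem (s : List Char) (q : Nat) : q ∈ pvGOcc s ↔ pvOccL s q := by
  rw [pvGOcc]
  split
  · rename_i h
    simp only [List.not_mem_nil, false_iff]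
    intro hocc
    rw [pvOccL_iff] at hocc
    have : PySem.Chars.find s pvK ≠ -1 := by
      rw [PySem.Chars.find_ne_neg_one_iff]
      exact hocc.isInfix.trans (List.drop_suffix q s).isInfix
    have := PySem.Chars.neg_one_le_find (s := s) (sub := pvK)
    omega
  · rename_i h
    have h0 : 0 ≤ PySem.Chars.find s pvK := by omega
    have hspec := PySem.Chars.find_spec (s := s) (sub := pvK) h0
    have hlen := pvFind_le s h
    set p := (PySem.Chars.find s pvK).toNat with hp
    have ihq := pvGOcc_mem (s.drop (p + 9))
    simp only [List.mem_cons, List.mem_map]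
    constructor
    · rintro (rfl | ⟨q', hq', rfl⟩)
      · rw [pvOccL_iff]; exact hspec.1
      · rw [ihq] at hq'
        rw [pvOccL_iff] at hq' ⊢
        rwa [List.drop_drop, Nat.add_comm] at hq'
    · intro hq
      rcases Nat.lt_or_ge q p with hlt | hge
      · exact absurd ((pvOccL_iff s q).1 hq) (hspec.2 q hlt)
      · rcases Nat.eq_or_lt_of_le hge with heq | hlt
        · exact Or.inl heq.symm
        · right
          have h9 : p + 9 ≤ q := pv_no_overlap ((pvOccL_iff s p).2 hspec.1) hq hlt
          refine ⟨q - (p + 9), ?_, by omega⟩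
          rw [ihq, pvOccL_iff, List.drop_drop]
          rw [pvOccL_iff] at hq
          have : p + 9 + (q - (p + 9)) = q := by omega
          rwa [this]
termination_by s.length
decreasing_by
  have := pvFind_le s (by assumption)
  simp
  omega

-- the occurrence list is 9-separated (hence strictly increasing)
theorem pvGOcc_chain (s : List Char) : (pvGOcc s).Pairwise (fun a b => a + 9 ≤ b) := by
  rw [pvGOcc]
  split
  · exact List.Pairwise.nil
  · rename_i h
    set p := (PySem.Chars.find s pvK).toNat
    refine List.pairwise_cons.2 ⟨?_, ?_⟩
    · intro b hb
      simp only [List.mem_map] at hb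
      obtain ⟨b', _, rfl⟩ := hb
      omega
    · rw [List.pairwise_map]
      exact (pvGOcc_chain (s.drop (p + 9))).imp (by intro a b hab; omega)
termination_by s.length
decreasing_by
  have := pvFind_le s (by assumption)
  simp
  omega

theorem pvGOcc_sorted (s : List Char) : (pvGOcc s).Pairwise (· < ·) :=
  (pvGOcc_chain s).imp (by intro a b h; omega)

theorem pvGOcc_nodup (s : List Char) : (pvGOcc s).Nodup :=
  (pvGOcc_sorted s).imp (by intro a b h; omega)

-- ---- count.go / splitOn.go bookkeeping ----

theorem pvCount_acc (sub : List Char) (fuel : Nat) : ∀ (l : List Char) (a : Nat),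
    PySem.Chars.count.go sub fuel l a = a + PySem.Chars.count.go sub fuel l 0 := by
  induction fuel with
  | zero => intro l a; simp [PySem.Chars.count.go]
  | succ n ih =>
    intro l a
    match l with
    | [] => simp [PySem.Chars.count.go]
    | c :: t =>
      rw [PySem.Chars.count.go, PySem.Chars.count.go]
      split
      · rw [ih _ (a + 1), ih _ (0 + 1)]
        omega
      · exact ih t a

theorem pvCount_nil (sub : List Char) (n a : Nat) :
    PySem.Chars.count.go sub n [] a = a := by
  cases n <;> simp [PySem.Chars.count.go]

theorem pvCount_fuel (sub : List Char) (hsub : sub ≠ []) (l : List Char) (n : Nat)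
    (hn : l.length ≤ n) :
    PySem.Chars.count.go sub n l 0 = PySem.Chars.count.go sub l.length l 0 := by
  match l with
  | [] => rw [pvCount_nil, pvCount_nil]
  | c :: t =>
    cases n with
    | zero => simp at hn
    | succ m =>
      rw [PySem.Chars.count.go, show (c :: t).length = t.length + 1 from rfl,
          PySem.Chars.count.go]
      split
      · rw [pvCount_acc, pvCount_acc sub t.length]
        congr 1
        have h1 : 1 ≤ sub.length := List.length_pos_of_ne_nil hsub
        have hdl : (List.drop sub.length (c :: t)).length ≤ t.length := by simp; omega
        have hmn : t.length ≤ m := by simpa using hn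
        rw [pvCount_fuel sub hsub _ m (le_trans hdl hmn),
            pvCount_fuel sub hsub _ t.length hdl]
      · exact pvCount_fuel sub hsub t m (by simpa using hn)
termination_by l.length
decreasing_by all_goals (simp; try omega)

-- count.go never counts when there is no occurrence
theorem pvCount_zero (sub : List Char) : ∀ (n : Nat) (l : List Char) (a : Nat),
    (∀ j, ¬ sub <+: l.drop j) → PySem.Chars.count.go sub n l a = a := by
  intro n
  induction n with
  | zero => intro l a _; simp [PySem.Chars.count.go]
  | succ m ih =>
    intro l a hno
    match l with
    | [] => simp [PySem.Chars.count.go]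
    | c :: t =>
      rw [PySem.Chars.count.go]
      split
      · rename_i hpre
        exact absurd (List.isPrefixOf_iff_prefix.1 hpre) (by simpa using hno 0)
      · exact ih t a (fun j => by simpa using hno (j + 1))

-- count.go skips to just past the first occurrence
theorem pvCount_skip (sub : List Char) (hsub : sub.length = 9) :
    ∀ (p : Nat) (l : List Char), (∀ j, j < p → ¬ sub <+: l.drop j) → sub <+: l.drop p →
    PySem.Chars.count.go sub l.length l 0 =
      1 + PySem.Chars.count.go sub (l.drop (p + 9)).length (l.drop (p + 9)) 0 := by
  intro p
  induction p with
  | zero =>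
    intro l hmin hocc
    match l with
    | [] =>
      simp at hocc
      rw [hocc] at hsub
      simp at hsub
    | c :: t =>
      rw [show (c :: t).length = t.length + 1 from rfl, PySem.Chars.count.go]
      rw [if_pos (List.isPrefixOf_iff_prefix.2 (by simpa using hocc))]
      rw [pvCount_acc]
      have hlen : (List.drop sub.length (c :: t)).length ≤ t.length := by
        simp [hsub]
      rw [pvCount_fuel sub (by intro h; rw [h] at hsub; simp at hsub) _ _ hlen]
      simp [hsub]
  | succ m ih =>
    intro l hmin hocc
    match l with
    | [] =>
      simp at hocc
      rw [hocc] at hsub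
      simp at hsub
    | c :: t =>
      rw [show (c :: t).length = t.length + 1 from rfl, PySem.Chars.count.go]
      rw [if_neg (by
        intro hpre
        exact hmin 0 (by omega) (by simpa using List.isPrefixOf_iff_prefix.1 hpre))]
      have h1 : ∀ j, j < m → ¬ sub <+: t.drop j := fun j hj => by
        simpa using hmin (j + 1) (by omega)
      have h2 : sub <+: t.drop m := by simpa using hocc
      have := ih t h1 h2
      rw [show (c :: t).drop (m + 1 + 9) = t.drop (m + 9) from by simp]
      exact this

-- count = length of the occurrence list
theorem pvCount_eq_gOcc (s : List Char) :
    PySem.Chars.count.go pvK s.length s 0 = (pvGOcc s).length := by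
  rw [pvGOcc]
  split
  · rename_i h
    have hm1 : PySem.Chars.find s pvK = -1 := by
      have := PySem.Chars.neg_one_le_find (s := s) (sub := pvK)
      omega
    rw [PySem.Chars.find_eq_neg_one_iff] at hm1
    refine pvCount_zero pvK s.length s 0 (fun j hocc => ?_)
    exact hm1 (hocc.isInfix.trans (List.drop_suffix j s).isInfix)
  · rename_i h
    have h0 : 0 ≤ PySem.Chars.find s pvK := by omega
    have hspec := PySem.Chars.find_spec (s := s) (sub := pvK) h0
    set p := (PySem.Chars.find s pvK).toNat
    rw [pvCount_skip pvK rfl p s hspec.2 hspec.1]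
    rw [pvCount_eq_gOcc (s.drop (p + 9))]
    simp
    omega
termination_by s.length
decreasing_by
  have := pvFind_le s (by assumption)
  simp
  omega

-- splitOn.go produces exactly one more piece than count.go counts
theorem pvSplit_count (sep : List Char) (fuel : Nat) :
    ∀ (l cur : List Char) (acc : List (List Char)),
    (PySem.Chars.splitOn.go sep fuel l cur acc).length =
      PySem.Chars.count.go sep fuel l acc.length + 1 := by
  induction fuel with
  | zero => intro l cur acc; simp [PySem.Chars.splitOn.go, PySem.Chars.count.go]
  | succ n ih =>
    intro l cur acc
    match l with
    | [] => simp [PySem.Chars.splitOn.go, PySem.Chars.count.go]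
    | c :: t =>
      rw [PySem.Chars.splitOn.go, PySem.Chars.count.go]
      split
      · rw [ih]
        simp
      · exact ih t (c :: cur) acc

theorem pvSplit_len (s : List Char) :
    (PySem.Chars.splitOn s pvK).length = (pvGOcc s).length + 1 := by
  rw [PySem.Chars.splitOn, pvSplit_count]
  rw [show (([] : List (List Char))).length = 0 from rfl]
  rw [pvCount_fuel pvK (by decide) s (s.length + 1) (by omega), pvCount_eq_gOcc]

-- ---- rfind = last occurrence ----

theorem pvRfind_none (s : List Char) (hno : ∀ j, ¬ pvOccL s j) :
    ∀ k, PySem.Chars.rfind.go s pvK k = -1 := by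
  intro k
  induction k with
  | zero =>
    rw [PySem.Chars.rfind.go, if_neg]
    intro hpre
    exact hno 0 ((pvOccL_iff s 0).2 (by simpa using List.isPrefixOf_iff_prefix.1 hpre))
  | succ j ih =>
    rw [PySem.Chars.rfind.go, if_neg, ih]
    intro hpre
    exact hno (j + 1) ((pvOccL_iff s (j + 1)).2 (List.isPrefixOf_iff_prefix.1 hpre))

theorem pvRfind_max (s : List Char) (q : Nat) (hq : pvOccL s q)
    (hmax : ∀ j, pvOccL s j → j ≤ q) :
    ∀ k, q ≤ k → PySem.Chars.rfind.go s pvK k = (q : Int) := by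
  intro k
  induction k with
  | zero =>
    intro hk
    have hq0 : q = 0 := by omega
    subst hq0
    have hc : pvK.isPrefixOf s = true :=
      List.isPrefixOf_iff_prefix.2 (by simpa using (pvOccL_iff s 0).1 hq)
    rw [PySem.Chars.rfind.go, if_pos hc]
    simp
  | succ j ih =>
    intro hk
    by_cases hocc : pvOccL s (j + 1)
    · have hqe : j + 1 = q := le_antisymm (hmax _ hocc) hk
      subst hqe
      have hc : pvK.isPrefixOf (List.drop (j + 1) s) = true :=
        List.isPrefixOf_iff_prefix.2 ((pvOccL_iff s (j + 1)).1 hq)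
      rw [PySem.Chars.rfind.go, if_pos hc]
    · have hq' : q ≤ j := by
        rcases Nat.eq_or_lt_of_le hk with h | h
        · exact absurd (h ▸ hq) hocc
        · omega
      rw [PySem.Chars.rfind.go, if_neg, ih hq']
      intro hpre
      exact hocc ((pvOccL_iff s (j + 1)).2 (List.isPrefixOf_iff_prefix.1 hpre))


-- ---- token-boundary bookkeeping ----

def pvSum (ts : List String) : Nat := (ts.map pvLen).sum

def pvPref : List String → Nat → Nat
  | _, 0 => 0
  | [], _ + 1 => 0
  | t :: r, b + 1 => pvLen t + pvPref r b

def pvBnd : List String → Nat → Nat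
  | [], _ => 0
  | t :: r, e => if e ≤ pvLen t then 1 else pvBnd r (e - pvLen t) + 1

-- the common value: token count covering the end of the last occurrence (0 if none)
def pvRes (ts : List String) : Int :=
  match (pvGOcc (PySem.Str.join "" ts).toList).getLast? with
  | none => 0
  | some L => ((pvBnd ts (L + 9) : Nat) : Int)

theorem pvPref_nil (b : Nat) : pvPref [] b = 0 := by
  cases b <;> rfl

theorem pvInterc_nil (l : List (List Char)) : List.intercalate [] l = l.flatten := by
  induction l with
  | nil => simp [List.intercalate]
  | cons a t ih =>
    cases t with
    | nil => simp [List.intercalate]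
    | cons b u =>
      rw [List.intercalate, List.intersperse_cons₂, List.flatten_cons, List.flatten_cons]
      rw [List.intercalate] at ih
      simp [ih]

theorem pvJoin_toList (ts : List String) :
    (PySem.Str.join "" ts).toList = (ts.map String.toList).flatten := by
  rw [PySem.Str.join, String.toList_ofList, PySem.Chars.join]
  rw [show ("" : String).toList = [] from rfl, pvInterc_nil]

theorem pvJoin_len (ts : List String) :
    (PySem.Str.join "" ts).toList.length = pvSum ts := by
  rw [pvJoin_toList, List.length_flatten, pvSum]
  congr 1
  simp [pvLen]

theorem pvJoin_drop (ts : List String) (b : Nat) :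
    (PySem.Str.join "" (ts.drop b)).toList = ((PySem.Str.join "" ts).toList).drop (pvPref ts b) := by
  rw [pvJoin_toList, pvJoin_toList]
  induction b generalizing ts with
  | zero => simp [pvPref]
  | succ m ih =>
    cases ts with
    | nil => simp [pvPref_nil]
    | cons t r =>
      rw [List.drop_succ_cons, ih r]
      rw [show pvPref (t :: r) (m + 1) = pvLen t + pvPref r m from rfl]
      rw [List.map_cons, List.flatten_cons, show pvLen t = t.toList.length from rfl]
      rw [List.drop_append]
      simp

theorem pvPref_add (ts : List String) (b j : Nat) :
    pvPref ts (b + j) = pvPref ts b + pvPref (ts.drop b) j := by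
  induction b generalizing ts with
  | zero => simp [pvPref]
  | succ m ih =>
    cases ts with
    | nil => simp [pvPref_nil]
    | cons t r =>
      rw [show m + 1 + j = (m + j) + 1 from by omega]
      rw [show pvPref (t :: r) ((m + j) + 1) = pvLen t + pvPref r (m + j) from rfl]
      rw [show pvPref (t :: r) (m + 1) = pvLen t + pvPref r m from rfl]
      rw [List.drop_succ_cons, ih r]
      omega

theorem pvBnd_le (ts : List String) (e : Nat) : pvBnd ts e ≤ ts.length := by
  induction ts generalizing e with
  | nil => simp [pvBnd]
  | cons t r ih =>
    rw [pvBnd]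
    split
    · simp
    · have := ih (e - pvLen t)
      simp
      omega

theorem pvBnd_shift (ts : List String) (b e : Nat) (he : 0 < e) (hb : b ≤ ts.length) :
    pvBnd ts (e + pvPref ts b) = b + pvBnd (ts.drop b) e := by
  induction b generalizing ts with
  | zero => simp [pvPref]
  | succ m ih =>
    cases ts with
    | nil => simp at hb
    | cons t r =>
      rw [show pvPref (t :: r) (m + 1) = pvLen t + pvPref r m from rfl]
      rw [pvBnd, if_neg (by omega), List.drop_succ_cons]
      rw [show e + (pvLen t + pvPref r m) - pvLen t = e + pvPref r m from by omega]
      rw [ih r (by simpa using hb)]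
      omega

theorem pvCut_eq (ts : List String) (e : Nat) : pvCut ts e = pvPref ts (pvBnd ts e) := by
  induction ts generalizing e with
  | nil => simp [pvCut, pvBnd, pvPref]
  | cons t r ih =>
    rw [pvCut, pvBnd]
    split
    · simp [pvPref]
    · rw [ih (e - pvLen t)]
      simp [pvPref]

theorem pvCut_lb (ts : List String) (e : Nat) (hse : e ≤ pvSum ts) : e ≤ pvCut ts e := by
  induction ts generalizing e with
  | nil => simp [pvSum] at hse; omega
  | cons t r ih =>
    rw [pvCut]
    split
    · omega
    · have := ih (e - pvLen t) (by simp [pvSum, pvLen] at hse ⊢; omega)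
      omega

-- A's inner loop computes the covering token count
theorem pvInner_spec (ts : List String) (e : Nat) (he : 0 < e) (hse : e ≤ pvSum ts) :
    ∀ (i loc : Int), findA_inner ts (loc + (e : Int)) i loc = i + (pvBnd ts e : Nat) := by
  induction ts generalizing e with
  | nil => simp [pvSum] at hse; omega
  | cons t r ih =>
    intro i loc
    rw [findA_inner, pvBnd]
    by_cases h : e ≤ pvLen t
    · rw [if_pos (by
        show loc + (e : Int) ≤ loc + PySem.Str.len t
        rw [show PySem.Str.len t = ((pvLen t : Nat) : Int) from rfl]
        omega), if_pos h]
      simp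
    · rw [if_neg (by
        show ¬ loc + (e : Int) ≤ loc + PySem.Str.len t
        rw [show PySem.Str.len t = ((pvLen t : Nat) : Int) from rfl]
        omega), if_neg h]
      have hrw : loc + (e : Int) = (loc + PySem.Str.len t) + ((e - pvLen t : Nat) : Int) := by
        rw [show PySem.Str.len t = ((pvLen t : Nat) : Int) from rfl]
        omega
      rw [hrw, ih (e - pvLen t) (by omega) (by simp [pvSum, pvLen] at hse ⊢; omega)]
      push_cast
      omega

-- B's scan computes the same token count
theorem pvAlt_spec (ts : List String) (e : Nat) (he : 0 < e) (hse : e ≤ pvSum ts) :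
    ∀ (n cum : Int), altScan (cum + (e : Int)) ts n cum = n + (pvBnd ts e : Nat) := by
  induction ts generalizing e with
  | nil => simp [pvSum] at hse; omega
  | cons t r ih =>
    intro n cum
    rw [altScan, pvBnd]
    by_cases h : e ≤ pvLen t
    · rw [if_pos (by
        show cum + (e : Int) ≤ cum + PySem.Str.len t
        rw [show PySem.Str.len t = ((pvLen t : Nat) : Int) from rfl]
        omega), if_pos h]
      simp
    · rw [if_neg (by
        show ¬ cum + (e : Int) ≤ cum + PySem.Str.len t
        rw [show PySem.Str.len t = ((pvLen t : Nat) : Int) from rfl]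
        omega), if_neg h]
      have hrw : cum + (e : Int) = (cum + PySem.Str.len t) + ((e - pvLen t : Nat) : Int) := by
        rw [show PySem.Str.len t = ((pvLen t : Nat) : Int) from rfl]
        omega
      rw [hrw, ih (e - pvLen t) (by omega) (by simp [pvSum, pvLen] at hse ⊢; omega)]
      push_cast
      omega

-- dropping the tokens through a boundary past all of `rest`'s predecessors shifts the occurrence list
theorem pvGOcc_drop (s : List Char) (p c : Nat) (rest : List Nat)
    (hg : pvGOcc s = p :: rest) (hcp : p < c) (hc : ∀ q ∈ rest, c ≤ q) :
    pvGOcc (s.drop c) = rest.map (· - c) := by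
  have hmemS : ∀ x, x ∈ pvGOcc (s.drop c) ↔ x ∈ rest.map (· - c) := by
    intro x
    rw [pvGOcc_mem, List.mem_map]
    constructor
    · intro hx
      have hox : pvOccL s (c + x) := by
        rw [pvOccL_iff] at hx ⊢
        rwa [List.drop_drop] at hx
      have hmem : c + x ∈ pvGOcc s := (pvGOcc_mem s _).2 hox
      rw [hg, List.mem_cons] at hmem
      rcases hmem with h | h
      · omega
      · exact ⟨c + x, h, by omega⟩
    · rintro ⟨q, hq, rfl⟩
      have hcq := hc q hq
      have hoq : pvOccL s q := (pvGOcc_mem s q).1 (hg ▸ List.mem_cons_of_mem _ hq)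
      rw [pvOccL_iff] at hoq ⊢
      rw [List.drop_drop, show c + (q - c) = q from by omega]
      exact hoq
  have hnd1 := pvGOcc_nodup (s.drop c)
  have hs1 := pvGOcc_sorted (s.drop c)
  have hsrest : rest.Pairwise (· < ·) := by
    have := pvGOcc_sorted s
    rw [hg] at this
    exact (List.pairwise_cons.1 this).2
  have hs2 : (rest.map (· - c)).Pairwise (· < ·) := by
    rw [List.pairwise_map]
    exact hsrest.imp_of_mem (fun ha hb hab => by
      have := hc _ ha
      have := hc _ hb
      omega)
  have hnd2 : (rest.map (· - c)).Nodup := hs2.imp_of_mem (fun _ _ h => by omega)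
  exact List.Perm.eq_of_pairwise (fun a b _ _ h1 h2 => le_antisymm h1 h2)
    (hs1.imp le_of_lt) (hs2.imp le_of_lt) ((List.perm_ext_iff_of_nodup hnd1 hnd2).2 hmemS)

-- A's outer loop, one frame per key, in clean form
def pvIter : Nat → List String → Int → Int
  | 0, _, total => total
  | n + 1, ts, total =>
    let joined := PySem.Str.join "" ts
    let key_loc := PySem.Chars.find joined.toList pvK
    let tok_end := findA_inner ts (key_loc + 9) 0 0
    pvIter n (PySem.List.slice ts (some tok_end) none) (total + tok_end)


theorem pvSorted_getLast_max : ∀ (l : List Nat) (L : Nat), l.Pairwise (· < ·) →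
    l.getLast? = some L → ∀ x ∈ l, x ≤ L := by
  intro l
  induction l with
  | nil => intro L _ h; simp at h
  | cons a t ih =>
    intro L hp hL x hx
    cases t with
    | nil =>
      simp at hL hx
      omega
    | cons b u =>
      rw [List.getLast?_cons_cons] at hL
      rcases List.mem_cons.1 hx with rfl | hx'
      · have hb : x < L := by
          have h1 := (List.pairwise_cons.1 hp).1
          have h2 := List.mem_of_getLast? hL
          exact h1 L h2
        omega
      · exact ih L (List.pairwise_cons.1 hp).2 hL x hx'

-- A's loop frames agree with pvIter
theorem pvStep9 : PySem.Str.len "Question:" = (9 : Int) := by decide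

theorem pvIter_spec (n : Nat) : ∀ (ts : List String) (total : Int),
    Pre_find_subject_range ts →
    (pvGOcc (PySem.Str.join "" ts).toList).length = n →
    pvIter n ts total = total + pvRes ts := by
  induction n with
  | zero =>
    intro ts total _ hlen
    have hnil : pvGOcc (PySem.Str.join "" ts).toList = [] := List.length_eq_zero_iff.1 hlen
    rw [pvIter, pvRes, hnil]
    simp
  | succ n ih =>
    intro ts total hpre hlen
    by_cases hf : PySem.Chars.find (PySem.Str.join "" ts).toList pvK < 0
    · rw [pvGOcc, dif_pos hf] at hlen
      simp at hlen
    · have hf0 : 0 ≤ PySem.Chars.find (PySem.Str.join "" ts).toList pvK := by omega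
      have hgeq : pvGOcc (PySem.Str.join "" ts).toList =
          ((PySem.Chars.find (PySem.Str.join "" ts).toList pvK).toNat) ::
          ((pvGOcc ((PySem.Str.join "" ts).toList.drop
              ((PySem.Chars.find (PySem.Str.join "" ts).toList pvK).toNat + 9))).map
            (· + ((PySem.Chars.find (PySem.Str.join "" ts).toList pvK).toNat + 9))) := by
        rw [pvGOcc, dif_neg hf]
      set s := (PySem.Str.join "" ts).toList with hs
      have hslen : (PySem.Str.join "" ts).toList.length = s.length := by rw [← hs]
      set p := (PySem.Chars.find s pvK).toNat with hp
      set grest := ((pvGOcc (s.drop (p + 9))).map (· + (p + 9))) with hgrest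
      have hspec := PySem.Chars.find_spec (s := s) (sub := pvK) hf0
      have hoccp : pvOccL s p := (pvOccL_iff s p).2 hspec.1
      have hplen : p + 9 ≤ s.length := pvFind_le s hf
      have hsum : s.length = pvSum ts := by rw [hs, pvJoin_len]
      have hc9 : p + 9 ≤ pvCut ts (p + 9) := pvCut_lb ts (p + 9) (by omega)
      set b := pvBnd ts (p + 9) with hb
      set c := pvPref ts b with hc
      have hceq : pvCut ts (p + 9) = c := by rw [hc, hb, pvCut_eq]
      have hble : b ≤ ts.length := by rw [hb]; exact pvBnd_le ts (p + 9)
      have hrest_occ : ∀ q ∈ grest, pvOccL s q := by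
        intro q hq
        exact (pvGOcc_mem s q).1 (hgeq ▸ List.mem_cons_of_mem _ hq)
      have hrest_gt : ∀ q ∈ grest, p < q := by
        have hsorted := pvGOcc_sorted s
        rw [hgeq] at hsorted
        exact fun q hq => (List.pairwise_cons.1 hsorted).1 q hq
      have hchain : ∀ q ∈ grest, c ≤ q := by
        intro q hq
        cases hgr : grest with
        | nil => rw [hgr] at hq; simp at hq
        | cons p2 g2 =>
          have hsorted := pvGOcc_sorted s
          rw [hgeq, hgr] at hsorted
          have hp2min : ∀ x ∈ p2 :: g2, p2 ≤ x := by
            intro x hxm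
            rcases List.mem_cons.1 hxm with rfl | hx'
            · exact le_refl x
            · exact le_of_lt ((List.pairwise_cons.1 (List.pairwise_cons.1 hsorted).2).1 x hx')
          have hoccp2 : pvOccL s p2 := hrest_occ p2 (by rw [hgr]; simp)
          have hpp2 : p < p2 := hrest_gt p2 (by rw [hgr]; simp)
          have hp2len : p2 + 9 ≤ s.length := pvOccL_len hoccp2
          have happ := hpre p (List.mem_range.2 (by omega)) p2 (List.mem_range.2 (by omega))
            hpp2 hoccp hoccp2 ?_
          · rw [hceq] at happ
            exact le_trans happ (hp2min q (hgr ▸ hq))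
          · intro r hr h1 h2 hocc
            have hrm : r ∈ pvGOcc s := (pvGOcc_mem s r).2 hocc
            rw [hgeq, hgr] at hrm
            rcases List.mem_cons.1 hrm with rfl | hrm'
            · omega
            · rcases List.mem_cons.1 hrm' with rfl | hrm''
              · omega
              · have := (List.pairwise_cons.1 (List.pairwise_cons.1 (by
                  have hsorted2 := pvGOcc_sorted s
                  rwa [hgeq, hgr] at hsorted2)).2).1 r hrm''
                omega
      -- one loop frame
      have htok : findA_inner ts (PySem.Chars.find s pvK + 9) 0 0 = ((b : Nat) : Int) := by
        have harg : PySem.Chars.find s pvK + 9 = (0 : Int) + ((p + 9 : Nat) : Int) := by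
          rw [hp, ← Int.toNat_of_nonneg hf0]
          push_cast
          omega
        rw [harg, pvInner_spec ts (p + 9) (by omega) (by omega)]
        simp [hb]
      have hslice : PySem.List.slice ts (some ((b : Nat) : Int)) none = ts.drop b :=
        PySem.List.slice_from_natCast ts b
      have hsdrop : (PySem.Str.join "" (ts.drop b)).toList = s.drop c := by
        rw [pvJoin_drop, ← hs, ← hc]
      have hGd : pvGOcc (s.drop c) = grest.map (· - c) :=
        pvGOcc_drop s p c grest hgeq (by omega) hchain
      have hlen' : (pvGOcc (PySem.Str.join "" (ts.drop b)).toList).length = n := by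
        rw [hsdrop, hGd, List.length_map]
        rw [hgeq] at hlen
        simpa [hgrest] using hlen
      -- Pre_ is preserved by the truncation
      have hpre' : Pre_find_subject_range (ts.drop b) := by
        intro p' hp' q' hq' hlt hop' hoq' hmid
        rw [hsdrop] at hop' hoq'
        have hoP : pvOccL s (c + p') := by
          rw [pvOccL_iff] at hop' ⊢
          rwa [List.drop_drop] at hop'
        have hoQ : pvOccL s (c + q') := by
          rw [pvOccL_iff] at hoq' ⊢
          rwa [List.drop_drop] at hoq'
        have hPl : c + p' + 9 ≤ s.length := pvOccL_len hoP
        have hQl : c + q' + 9 ≤ s.length := pvOccL_len hoQ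
        have happ := hpre (c + p') (List.mem_range.2 (by omega)) (c + q')
          (List.mem_range.2 (by omega)) (by omega) hoP hoQ ?_
        · have hshift : c + pvCut (ts.drop b) (p' + 9) = pvCut ts (c + p' + 9) := by
            rw [pvCut_eq ts, show c + p' + 9 = (p' + 9) + pvPref ts b from by rw [hc]; omega]
            rw [pvBnd_shift ts b (p' + 9) (by omega) hble]
            rw [pvPref_add, pvCut_eq]
          omega
        · intro r hr h1 h2 hocc
          have hrc : c < r := by omega
          have hocc' : pvOccL (s.drop c) (r - c) := by
            rw [pvOccL_iff] at hocc ⊢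
            rw [List.drop_drop, show c + (r - c) = r from by omega]
            exact hocc
          have hrlen : r - c < (PySem.Str.join "" (ts.drop b)).toList.length := by
            rw [hsdrop]
            have := pvOccL_len hocc'
            omega
          rw [← hsdrop] at hocc'
          exact hmid (r - c) (List.mem_range.2 hrlen) (by omega) (by omega) hocc'
      have hiter := ih (ts.drop b) (total + ((b : Nat) : Int)) hpre' hlen'
      -- assemble the frame
      rw [pvIter]
      simp only [← hs]
      rw [htok, hslice, hiter]
      -- compose the results
      rw [pvRes, pvRes, hsdrop, hGd, ← hs, hgeq, List.getLast?_map]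
      cases hgr : grest with
      | nil =>
        simp [hb]
      | cons p2 g2 =>
        have hLex : ∃ L, (p2 :: g2).getLast? = some L := by
          cases hLg : (p2 :: g2).getLast? with
          | none => simp at hLg
          | some L => exact ⟨L, rfl⟩
        obtain ⟨L, hL⟩ := hLex
        have hLmem : L ∈ grest := by rw [hgr]; exact List.mem_of_getLast? hL
        have hcL : c ≤ L := hchain L hLmem
        rw [List.getLast?_cons_cons, hL]
        simp only [Option.map_some]
        have hcomp : pvBnd ts (L + 9) = b + pvBnd (ts.drop b) (L - c + 9) := by
          rw [show L + 9 = (L - c + 9) + pvPref ts b from by rw [← hc]; omega]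
          rw [pvBnd_shift ts b (L - c + 9) (by omega) hble]
        rw [hcomp]
        push_cast
        ring


-- one frame of A's foldl body, as the port writes it
def pvStep (st : List String × String × Int) : List String × String × Int :=
  let key_loc := PySem.Str.find st.2.1 "Question:"
  let tok_end := findA_inner st.1 (key_loc + PySem.Str.len "Question:") 0 0
  let ta' := PySem.List.slice st.1 (some tok_end) none
  (ta', PySem.Str.join "" ta', st.2.2 + tok_end)

theorem pvFoldl_step (l : List Int) : ∀ (ts : List String) (total : Int),
    (l.foldl (fun st _ => pvStep st) (ts, PySem.Str.join "" ts, total)).2.2 =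
      pvIter l.length ts total := by
  induction l with
  | nil => intro ts total; simp [pvIter]
  | cons a t ih =>
    intro ts total
    rw [List.foldl_cons]
    have hstep : pvStep (ts, PySem.Str.join "" ts, total) =
        (PySem.List.slice ts
            (some (findA_inner ts (PySem.Chars.find (PySem.Str.join "" ts).toList pvK + 9) 0 0)) none,
          PySem.Str.join "" (PySem.List.slice ts
            (some (findA_inner ts (PySem.Chars.find (PySem.Str.join "" ts).toList pvK + 9) 0 0)) none),
          total + findA_inner ts (PySem.Chars.find (PySem.Str.join "" ts).toList pvK + 9) 0 0) := by
      simp only [pvStep, pvStep9]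
      rfl
    rw [hstep, ih]
    rw [show (a :: t).length = t.length + 1 from rfl, pvIter]

-- B's port computes pvRes
theorem pvAlt_eq (ts : List String) : find_subject_range_alt ts = pvRes ts := by
  simp only [find_subject_range_alt]
  cases hg : pvGOcc (PySem.Str.join "" ts).toList with
  | nil =>
    have hno : ∀ j, ¬ pvOccL (PySem.Str.join "" ts).toList j := by
      intro j h
      have := (pvGOcc_mem (PySem.Str.join "" ts).toList j).2 h
      rw [hg] at this
      simp at this
    have hrf : PySem.Str.rfind (PySem.Str.join "" ts) "Question:" = -1 := by
      show PySem.Chars.rfind.go (PySem.Str.join "" ts).toList pvK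
        (PySem.Str.join "" ts).toList.length = -1
      exact pvRfind_none _ hno _
    rw [hrf, if_pos rfl, pvRes, hg]
    rfl
  | cons p grest =>
    have hLex : ∃ L, (p :: grest).getLast? = some L := by
      cases hLg : (p :: grest).getLast? with
      | none => simp at hLg
      | some L => exact ⟨L, rfl⟩
    obtain ⟨L, hL⟩ := hLex
    have hLmem : L ∈ p :: grest := List.mem_of_getLast? hL
    have hoccL : pvOccL (PySem.Str.join "" ts).toList L :=
      (pvGOcc_mem _ L).1 (hg ▸ hLmem)
    have hmax : ∀ j, pvOccL (PySem.Str.join "" ts).toList j → j ≤ L := by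
      intro j hj
      have hjm : j ∈ p :: grest := hg ▸ (pvGOcc_mem _ j).2 hj
      exact pvSorted_getLast_max _ L (hg ▸ pvGOcc_sorted _) hL j hjm
    have hLlen : L + 9 ≤ (PySem.Str.join "" ts).toList.length := pvOccL_len hoccL
    have hrf : PySem.Str.rfind (PySem.Str.join "" ts) "Question:" = ((L : Nat) : Int) := by
      show PySem.Chars.rfind.go (PySem.Str.join "" ts).toList pvK
        (PySem.Str.join "" ts).toList.length = ((L : Nat) : Int)
      exact pvRfind_max _ L hoccL hmax _ (by omega)
    rw [hrf, if_neg (by omega), pvStep9]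
    have harg : ((L : Nat) : Int) + 9 = (0 : Int) + ((L + 9 : Nat) : Int) := by
      push_cast
      omega
    rw [harg, pvAlt_spec ts (L + 9) (by omega) (by rw [← pvJoin_len]; omega)]
    rw [pvRes, hg, hL]
    show 0 + ((pvBnd ts (L + 9) : Nat) : Int) = ((pvBnd ts (L + 9) : Nat) : Int)
    omega

-- A's port computes pvRes on Pre_
theorem pvA_eq (ts : List String) (hpre : Pre_find_subject_range ts) :
    find_subject_range ts = pvRes ts := by
  have hjk : PySem.Str.join "" ((PySem.Str.split₀ "Question:").map PySem.Str.strip) =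
      "Question:" := by decide
  simp only [find_subject_range, hjk]
  have hsplit : ((PySem.Chars.splitOn (PySem.Str.join "" ts).toList "Question:".toList).length : Int) - 1 =
      (((pvGOcc (PySem.Str.join "" ts).toList).length : Nat) : Int) := by
    rw [show "Question:".toList = pvK from rfl, pvSplit_len]
    push_cast
    omega
  rw [hsplit, PySem.List.pyRange_zero_natCast]
  rw [show (fun (st : List String × String × Int) (_ : Int) =>
      (PySem.List.slice st.1
          (some (findA_inner st.1 (PySem.Str.find st.2.1 "Question:" + PySem.Str.len "Question:") 0 0)) none,
        PySem.Str.join "" (PySem.List.slice st.1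
          (some (findA_inner st.1 (PySem.Str.find st.2.1 "Question:" + PySem.Str.len "Question:") 0 0)) none),
        st.2.2 + findA_inner st.1 (PySem.Str.find st.2.1 "Question:" + PySem.Str.len "Question:") 0 0)) =
      (fun st _ => pvStep st) from rfl]
  rw [pvFoldl_step]
  simp only [List.length_map, List.length_range]
  rw [pvIter_spec _ ts 0 hpre rfl]
  omega

theorem find_subject_range_spec : Claim_equal_find_subject_range := by
  intro token_array _ hpre
  unfold Spec_find_subject_range
  rw [pvA_eq token_array hpre, pvAlt_eq]
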